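-- pv_equiv track=rewrite | github.com/loning/mbook-binary | src/binaryuniverse/tests/test_T32_1.py | _filter_valid_indices
-- ===== SOURCE A (Python) =====
-- from typing import List, Dict, Set, Tuple, Optional, Iterator, Union, Callable, Any
--
-- def _filter_valid_indices(indices: Set[int]) -> Set[int]:
--     """过滤出满足no-11约束的索引"""
--     if not indices:
--         return set()
--
--     sorted_indices = sorted(indices)
--     valid_indices = {sorted_indices[0]}
--
--     for i in range(1, len(sorted_indices)):
--         curr = sorted_indices[i]
--         prev = sorted_indices[i-1]
--
--         # 如果与前一个索引相差1，跳过（保持no-11约束）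
--         if curr - prev > 1:
--             valid_indices.add(curr)
--
--     return valid_indices
-- ===== SOURCE B (Python) =====
-- def _filter_valid_indices(indices):
--     """Keep exactly the indices whose immediate predecessor is absent (the start of each run)."""
--     return {x for x in sorted(indices) if x - 1 not in indices}
-- ===== Notes on version B (the rewrite author's own statement) =====
-- stated objective: simpler
-- what changed: Replaces A's positional loop over adjacent gaps in the sorted list by a membership characterisation: an index is a run start iff its immediate predecessor is not in the set, so B is a one-line set comprehension with no neighbour comparisons.
import Mathlib
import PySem

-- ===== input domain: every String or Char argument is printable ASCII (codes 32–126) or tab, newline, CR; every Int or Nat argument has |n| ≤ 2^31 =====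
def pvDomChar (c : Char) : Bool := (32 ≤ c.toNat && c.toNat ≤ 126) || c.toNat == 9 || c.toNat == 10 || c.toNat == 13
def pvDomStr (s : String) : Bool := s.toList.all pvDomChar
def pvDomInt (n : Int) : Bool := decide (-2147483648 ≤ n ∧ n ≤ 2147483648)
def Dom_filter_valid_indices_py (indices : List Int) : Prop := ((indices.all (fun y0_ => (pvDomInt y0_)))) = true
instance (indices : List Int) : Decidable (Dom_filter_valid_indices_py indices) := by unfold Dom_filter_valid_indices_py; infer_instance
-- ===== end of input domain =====

-- B replaces A's adjacent-gap loop over the sorted list by the membership characterisation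
-- "keep x iff x-1 is not in the set" (objective: simpler).

-- ===== PORT A =====
def filter_valid_indices_py (indices : List Int) : List Int :=
  if indices = [] then []
  else
    let sorted_indices := PySem.List.sorted indices (fun x => x) false
    let valid0 : PySem.Set Int := PySem.Set.ofList [PySem.List.pyGetD sorted_indices 0 0]
    (PySem.List.pyRange 1 (PySem.List.len sorted_indices) 1).foldl
      (fun valid i =>
        let curr := PySem.List.pyGetD sorted_indices i 0
        let prev := PySem.List.pyGetD sorted_indices (i - 1) 0
        if curr - prev > 1 then PySem.Set.add valid curr else valid)
      valid0

-- ===== PORT B =====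
def filter_valid_indices_py_alt (indices : List Int) : List Int :=
  PySem.Set.ofList
    ((PySem.List.sorted indices (fun x => x) false).filter
      (fun x => !(PySem.Set.contains indices (x - 1))))

-- ===== PRECONDITION & SPEC =====
-- Pre_: the Python parameter is a set[int]; under the type convention its List encoding holds
-- DISTINCT elements, so lists with duplicate entries represent no Python input and are excluded.
def Pre_filter_valid_indices_py (indices : List Int) : Prop := indices.Nodup
instance (indices : List Int) : Decidable (Pre_filter_valid_indices_py indices) := by
  unfold Pre_filter_valid_indices_py; infer_instance

def pvWitness_filter_valid_indices_py : List Int := [0, 2, 3, 7]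

def Spec_filter_valid_indices_py (indices : List Int) (out : List Int) : Prop := out = filter_valid_indices_py_alt indices
instance (indices : List Int) (out : List Int) : Decidable (Spec_filter_valid_indices_py indices out) := by unfold Spec_filter_valid_indices_py; infer_instance

-- ===== CLAIM (what is proved, stated in full; the proofs are below) =====
def Claim_equal_filter_valid_indices_py : Prop := ∀ (indices : List Int), Dom_filter_valid_indices_py indices → Pre_filter_valid_indices_py indices → Spec_filter_valid_indices_py indices (filter_valid_indices_py indices)

-- ===== LEMMAS AND PROOFS =====

-- run starts after a known previous element: keep c iff the gap to the previous element exceeds 1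
def pvRef (prev : Int) : List Int → List Int
  | [] => []
  | c :: t => if c - prev > 1 then c :: pvRef c t else pvRef c t

lemma pvRef_chain : ∀ (t : List Int) (prev : Int),
    (prev :: t).Pairwise (· < ·) → (prev :: pvRef prev t).Pairwise (· < ·) := by
  intro t
  induction t with
  | nil => intro prev _; simp [pvRef]
  | cons c t ih =>
    intro prev hp
    have hpc : prev < c := (List.pairwise_cons.1 hp).1 c (by simp)
    have htail : (c :: t).Pairwise (· < ·) := (List.pairwise_cons.1 hp).2
    have hih := ih c htail
    simp only [pvRef]
    split
    · exact List.Pairwise.cons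
        (fun y hy => by
          rcases List.mem_cons.1 hy with rfl | hy
          · exact hpc
          · exact lt_trans hpc ((List.pairwise_cons.1 hih).1 y hy)) hih
    · exact List.Pairwise.cons
        (fun y hy => lt_trans hpc ((List.pairwise_cons.1 hih).1 y hy))
        (List.Pairwise.of_cons hih)

-- A's indexed loop body, reading the sorted list at i-1 and i, is the loop over adjacent pairs
lemma pv_pairs_eq (s : List Int) :
    (PySem.List.pyRange 1 (PySem.List.len s) 1).map
        (fun i => (PySem.List.pyGetD s (i - 1) 0, PySem.List.pyGetD s i 0))
      = s.zip s.tail := by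
  apply List.ext_getElem
  · simp [PySem.List.length_pyRange_one, PySem.List.len]
  · intro k h1 h2
    have hk : k + 1 < s.length := by
      simp [PySem.List.length_pyRange_one, PySem.List.len] at h1
      omega
    simp only [List.getElem_map, PySem.List.getElem_pyRange_one, List.getElem_zip]
    have e1 : (1 : Int) + (k : Int) - 1 = ((k : Nat) : Int) := by omega
    have e2 : (1 : Int) + (k : Int) = (((k + 1 : Nat)) : Int) := by push_cast; omega
    rw [e1, e2, PySem.List.pyGetD_natCast, PySem.List.pyGetD_natCast]
    have h2' : k < s.tail.length := by simpa [List.length_tail] using h2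
    simp [List.getD_eq_getElem?_getD, List.getElem?_eq_getElem (by omega : k < s.length),
      List.getElem?_eq_getElem hk, List.getElem_tail]

-- the pair loop with Set.add appends exactly the run starts after prev
lemma pv_chain_fold : ∀ (t : List Int) (prev : Int) (acc : List Int),
    (prev :: t).Pairwise (· < ·) → (∀ a ∈ acc, a ≤ prev) →
    ((prev :: t).zip t).foldl
        (fun v pr => if pr.2 - pr.1 > 1 then PySem.Set.add v pr.2 else v) acc
      = acc ++ pvRef prev t := by
  intro t
  induction t with
  | nil => intro prev acc _ _; simp [pvRef]
  | cons c t ih =>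
    intro prev acc hp hacc
    have hpc : prev < c := (List.pairwise_cons.1 hp).1 c (by simp)
    have htail : (c :: t).Pairwise (· < ·) := (List.pairwise_cons.1 hp).2
    simp only [List.zip_cons_cons, List.foldl_cons, pvRef]
    by_cases hgap : c - prev > 1
    · have hnot : c ∉ acc := fun hc => absurd (hacc c hc) (by omega)
      have hadd : PySem.Set.add acc c = acc ++ [c] := by
        simp [PySem.Set.add]
        exact hnot
      rw [if_pos hgap, hadd, ih c (acc ++ [c]) htail
        (by intro a ha; rcases List.mem_append.1 ha with ha | ha
            · exact le_of_lt (lt_of_le_of_lt (hacc a ha) hpc)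
            · simp at ha; omega),
        if_pos hgap]
      simp
    · rw [if_neg hgap, ih c acc htail
        (fun a ha => le_of_lt (lt_of_le_of_lt (hacc a ha) hpc)), if_neg hgap]

-- on a strictly increasing chain, 'c-1 is a member' is exactly 'the gap to the previous element is 1'
lemma pv_filter_eq : ∀ (t : List Int) (pre : List Int) (prev : Int) (s : List Int),
    s = pre ++ prev :: t → s.Pairwise (· < ·) →
    t.filter (fun c => !(decide ((c - 1) ∈ s))) = pvRef prev t := by
  intro t
  induction t with
  | nil => intro _ _ _ _ _; simp [pvRef]
  | cons c t ih =>
    intro pre prev s hs hp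
    have hp' := hs ▸ hp
    rw [List.pairwise_append] at hp'
    have hcons := hp'.2.1
    have hpc : prev < c := (List.pairwise_cons.1 hcons).1 c (by simp)
    have hmem : (c - 1) ∈ s ↔ prev = c - 1 := by
      constructor
      · intro h
        rw [hs] at h
        rcases List.mem_append.1 h with h | h
        · exact absurd (hp'.2.2 _ h prev (by simp)) (by omega)
        · rcases List.mem_cons.1 h with h | h
          · omega
          · rcases List.mem_cons.1 h with h | h
            · omega
            · have := (List.pairwise_cons.1 (List.pairwise_cons.1 hcons).2).1 _ h
              omega
      · intro h; rw [hs, h]; simp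
    have hstep : s = (pre ++ [prev]) ++ c :: t := by simp [hs]
    by_cases hgap : c - prev > 1
    · have hc : (!(decide ((c - 1) ∈ s))) = true := by simp [hmem]; omega
      rw [List.filter_cons, if_pos hc, ih (pre ++ [prev]) c s hstep hp]
      simp only [pvRef, if_pos hgap]
    · have hc : (!(decide ((c - 1) ∈ s))) = false := by simp [hmem]; omega
      rw [List.filter_cons, hc, if_neg (by simp), ih (pre ++ [prev]) c s hstep hp]
      simp only [pvRef, if_neg hgap]

-- ===== VERDICT (by name: the statement is the Claim_ definition above) =====
theorem filter_valid_indices_py_spec : Claim_equal_filter_valid_indices_py := by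
  intro indices _ hnd
  unfold Spec_filter_valid_indices_py filter_valid_indices_py filter_valid_indices_py_alt
  by_cases hnil : indices = []
  · subst hnil; decide
  · rw [if_neg hnil]
    have hperm : (PySem.List.sorted indices (fun x => x) false).Perm indices :=
      PySem.List.sorted_perm indices (fun x => x) false
    have hlt : (PySem.List.sorted indices (fun x => x) false).Pairwise (· < ·) := by
      have hle := PySem.List.sorted_pairwise indices (fun x => x)
      have hnds := hperm.nodup_iff.2 hnd
      exact (hle.and hnds).imp (fun h => lt_of_le_of_ne h.1 h.2)
    have hsne : (PySem.List.sorted indices (fun x => x) false) ≠ [] := by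
      intro h
      exact hnil (List.Perm.nil_eq (h ▸ hperm)).symm
    obtain ⟨x, t, hxt⟩ := List.exists_cons_of_ne_nil hsne
    rw [hxt] at hperm hlt ⊢
    -- predicate of B: membership in indices = membership in s
    have hpred : (fun y => !(PySem.Set.contains indices (y - 1)))
        = (fun y => !(decide ((y - 1) ∈ (x :: t)))) := by
      funext y
      by_cases h : (y - 1) ∈ indices
      · have h2 : (y - 1) ∈ x :: t := hperm.mem_iff.2 h
        simp [h2]
        exact h
      · have h2 : (y - 1) ∉ x :: t := fun hc => h (hperm.mem_iff.1 hc)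
        simp [h2]
        exact h
    rw [hpred]
    -- B side: filter = x :: pvRef x t
    have hheadmem : ((x - 1) ∈ (x :: t)) = False := by
      simp only [eq_iff_iff, iff_false]
      intro h
      rcases List.mem_cons.1 h with h | h
      · omega
      · have := (List.pairwise_cons.1 hlt).1 _ h; omega
    have hfB : (x :: t).filter (fun y => !(decide ((y - 1) ∈ (x :: t)))) = x :: pvRef x t := by
      rw [List.filter_cons, if_pos (by simp [hheadmem])]
      rw [pv_filter_eq t [] x (x :: t) (by simp) hlt]
    have hnodup2 : (x :: pvRef x t).Nodup :=
      List.Pairwise.imp (fun h => ne_of_lt h) (pvRef_chain t x hlt)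
    rw [hfB, PySem.Set.ofList_eq_self_of_nodup _ hnodup2]
    -- A side
    have hfold := pv_pairs_eq (x :: t)
    rw [List.tail_cons] at hfold
    have h0 : PySem.Set.ofList [PySem.List.pyGetD (x :: t) 0 0] = [x] := by simp [pysem]
    calc (PySem.List.pyRange 1 (PySem.List.len (x :: t)) 1).foldl
          (fun valid i =>
            if PySem.List.pyGetD (x :: t) i 0 - PySem.List.pyGetD (x :: t) (i - 1) 0 > 1
            then PySem.Set.add valid (PySem.List.pyGetD (x :: t) i 0) else valid)
          (PySem.Set.ofList [PySem.List.pyGetD (x :: t) 0 0])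
        = ((x :: t).zip t).foldl
            (fun v pr => if pr.2 - pr.1 > 1 then PySem.Set.add v pr.2 else v) [x] := by
          rw [← hfold, List.foldl_map, h0]
      _ = [x] ++ pvRef x t := pv_chain_fold t x [x] hlt (by simp)
      _ = x :: pvRef x t := by simp
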